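-- pv_equiv track=rewrite | github.com/quovadisss/morphological_analysis | MA/clustering.py | cluster_df
-- ===== SOURCE A (Python) =====
-- def cluster_df(x, y):
--     all_words = []
--     for cluster in range(0, y):
--         words = []
--         for i in range(0, len(list(x.values()))):
--             if(list(x.values())[i] == cluster):
--                 words.append(list(x.keys())[i])
--         all_words.append(words)
--     number = 0
--     for i in all_words:
--         if len(i) <= 5 and len(i) >= 3:
--             number += 1
--     return number, all_words
-- ===== SOURCE B (Python) =====
-- def cluster_df(x, y):
--     groups = {}
--     for k, v in x.items():
--         groups.setdefault(v, []).append(k)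
--     all_words = [groups.get(c, []) for c in range(y)]
--     number = sum(1 for b in all_words if 3 <= len(b) <= 5)
--     return number, all_words
-- ===== Notes on version B (the rewrite author's own statement) =====
-- stated objective: faster
-- what changed: Replaces the per-cluster rescans of list(x.values())/list(x.keys()) (rebuilt at every index) by a single grouping pass that appends each key to a dict bucket keyed by its cluster value, then reads the buckets off in cluster order.
import Mathlib
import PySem

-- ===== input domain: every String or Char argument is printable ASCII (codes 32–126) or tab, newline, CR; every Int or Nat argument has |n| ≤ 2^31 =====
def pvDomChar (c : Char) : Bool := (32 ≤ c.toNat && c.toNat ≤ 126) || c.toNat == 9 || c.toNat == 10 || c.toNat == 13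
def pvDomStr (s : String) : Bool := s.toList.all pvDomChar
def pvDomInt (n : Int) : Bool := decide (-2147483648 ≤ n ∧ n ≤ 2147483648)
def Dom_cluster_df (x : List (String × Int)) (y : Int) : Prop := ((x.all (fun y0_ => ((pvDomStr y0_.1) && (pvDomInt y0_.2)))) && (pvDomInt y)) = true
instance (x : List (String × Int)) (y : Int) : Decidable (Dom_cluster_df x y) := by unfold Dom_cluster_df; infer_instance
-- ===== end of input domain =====

-- B replaces A's y×n² repeated scans of the dict by one grouping pass into a dict of buckets (objective: faster).

-- ===== PORT A =====
-- literal port of A: for each cluster in range(0, y) scan all positions of list(x.values()),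
-- collecting list(x.keys())[i] when the value equals the cluster; then count buckets of size 3..5
def cluster_df (x : List (String × Int)) (y : Int) : Int × List (List String) :=
  let d := PySem.Dict.ofList x
  let all_words := (PySem.List.pyRange 0 y 1).foldl
    (fun all_words cluster =>
      all_words ++ [(PySem.List.pyRange 0 (PySem.List.len d.values) 1).foldl
        (fun words i =>
          if PySem.List.pyGetD d.values i 0 = cluster
          then words ++ [PySem.List.pyGetD d.keys i ""]
          else words) []]) []
  let number := all_words.foldl
    (fun number i => if PySem.List.len i ≤ 5 ∧ 3 ≤ PySem.List.len i then number + 1 else number) 0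
  (number, all_words)

-- ===== PORT B =====
-- literal port of B: one pass 'groups.setdefault(v, []).append(k)' (= modify), then read the buckets off
def cluster_df_alt (x : List (String × Int)) (y : Int) : Int × List (List String) :=
  let groups := (PySem.Dict.ofList x).items.foldl
    (fun g p => g.modify p.2 [] (fun b => b ++ [p.1])) PySem.Dict.empty
  let all_words := (PySem.List.pyRange 0 y 1).map (fun c => groups.getD c [])
  let number := (all_words.map
    (fun b => if 3 ≤ PySem.List.len b ∧ PySem.List.len b ≤ 5 then (1 : Int) else 0)).sum
  (number, all_words)

-- ===== PRECONDITION & SPEC =====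
def Spec_cluster_df (x : List (String × Int)) (y : Int) (out : Int × List (List String)) : Prop := out = cluster_df_alt x y
instance (x : List (String × Int)) (y : Int) (out : Int × List (List String)) : Decidable (Spec_cluster_df x y out) := by unfold Spec_cluster_df; infer_instance

-- ===== CLAIM (what is proved, stated in full; the proofs are below) =====
def Claim_equal_cluster_df : Prop := ∀ (x : List (String × Int)) (y : Int), Dom_cluster_df x y → Spec_cluster_df x y (cluster_df x y)

-- ===== LEMMAS AND PROOFS =====

-- A's inner index loop over list(x.values())/list(x.keys()) is the filter of the items by value = cluster
theorem wordsA_eq (L : List (String × Int)) (c : Int) :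
    (PySem.List.pyRange 0 (PySem.List.len (L.map Prod.snd)) 1).foldl
      (fun words i =>
        if PySem.List.pyGetD (L.map Prod.snd) i 0 = c
        then words ++ [PySem.List.pyGetD (L.map Prod.fst) i ""]
        else words) []
    = (L.filter (fun p => p.2 == c)).map Prod.fst := by
  have hv : ∀ i, PySem.List.pyGetD (L.map Prod.snd) i (0 : Int)
      = (PySem.List.pyGetD L i ("", 0)).2 := fun i => PySem.List.pyGetD_map Prod.snd L i ("", 0)
  have hk : ∀ i, PySem.List.pyGetD (L.map Prod.fst) i ""
      = (PySem.List.pyGetD L i ("", 0)).1 := fun i => PySem.List.pyGetD_map Prod.fst L i ("", 0)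
  simp only [hv, hk, PySem.List.len_eq, List.length_map]
  rw [PySem.List.foldl_pyRange_zero_pyGetD' L ("", 0)
      (fun words p => if p.2 = c then words ++ [p.1] else words) []]
  have := PySem.List.foldl_append_if (fun p : String × Int => p.2 == c) Prod.fst L []
  simpa using this

-- B's grouping pass, read at cluster c, is the same filter
theorem wordsB_eq (L : List (String × Int)) (c : Int) :
    (L.foldl (fun (g : PySem.Dict Int (List String)) p => g.modify p.2 [] (fun b => b ++ [p.1]))
        PySem.Dict.empty).getD c []
    = (L.filter (fun p => p.2 == c)).map Prod.fst := by
  have h : L.foldl (fun (g : PySem.Dict Int (List String)) p => g.modify p.2 [] (fun b => b ++ [p.1]))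
        PySem.Dict.empty
      = (L.map Prod.swap).foldl (fun g p => g.modify p.1 [] (fun b => b ++ [p.2])) PySem.Dict.empty := by
    rw [List.foldl_map]; simp
  rw [h, PySem.Dict.getD_foldl_modify_append]
  simp [List.filter_map, Function.comp_def]

-- ===== VERDICT (by name: the statement is the Claim_ definition above) =====
theorem cluster_df_spec : Claim_equal_cluster_df := by
  intro x y _
  unfold Spec_cluster_df cluster_df cluster_df_alt
  set L := (PySem.Dict.ofList x).items with hL
  have hvals : (PySem.Dict.ofList x).values = L.map Prod.snd := rfl
  have hkeys : (PySem.Dict.ofList x).keys = L.map Prod.fst := rfl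
  simp only [hvals, hkeys]
  rw [PySem.List.foldl_append_singleton_eq_map]
  have hwords : ∀ c : Int,
      (PySem.List.pyRange 0 (PySem.List.len (L.map Prod.snd)) 1).foldl
        (fun words i =>
          if PySem.List.pyGetD (L.map Prod.snd) i 0 = c
          then words ++ [PySem.List.pyGetD (L.map Prod.fst) i ""]
          else words) []
      = (L.foldl (fun (g : PySem.Dict Int (List String)) p => g.modify p.2 [] (fun b => b ++ [p.1]))
          PySem.Dict.empty).getD c [] := by
    intro c; rw [wordsA_eq, wordsB_eq]
  have hbuckets :
      (PySem.List.pyRange 0 y 1).map (fun c =>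
        (PySem.List.pyRange 0 (PySem.List.len (L.map Prod.snd)) 1).foldl
          (fun words i =>
            if PySem.List.pyGetD (L.map Prod.snd) i 0 = c
            then words ++ [PySem.List.pyGetD (L.map Prod.fst) i ""]
            else words) [])
      = (PySem.List.pyRange 0 y 1).map (fun c =>
        (L.foldl (fun (g : PySem.Dict Int (List String)) p => g.modify p.2 [] (fun b => b ++ [p.1]))
            PySem.Dict.empty).getD c []) :=
    List.map_congr_left (fun c _ => hwords c)
  rw [List.nil_append, hbuckets]
  refine Prod.ext ?_ rfl
  dsimp only
  have e1 : (fun (number : Int) (i : List String) =>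
        if PySem.List.len i ≤ 5 ∧ 3 ≤ PySem.List.len i then number + 1 else number)
      = fun number i =>
        if (fun b => decide (PySem.List.len b ≤ 5 ∧ 3 ≤ PySem.List.len b)) i = true
        then number + 1 else number := by
    funext n i; simp
  have e2 : (fun (b : List String) =>
        if 3 ≤ PySem.List.len b ∧ PySem.List.len b ≤ 5 then (1 : Int) else 0)
      = fun b =>
        if (fun b => decide (3 ≤ PySem.List.len b ∧ PySem.List.len b ≤ 5)) b = true
        then (1 : Int) else 0 := by
    funext b; simp
  rw [e1, e2, PySem.List.foldl_count_if, PySem.List.sum_map_ite_one_zero, zero_add]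
  norm_cast
  exact List.countP_congr (fun a _ => by simp [and_comm])
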